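-- pv_equiv track=rewrite | github.com/DGrothe-PhD/lerntools | WordGames/wordlength.py | wordlength
-- ===== SOURCE A (Python) =====
-- def wordlength(tx):
-- 	if len(tx)<1:
-- 		return 0
-- 	'''Returns the sum of letters of a string.'''
-- 	b = tx.split()
-- 	j=0
-- 	for w in b:
-- 		j+= len(w)
-- 	return j
-- ===== SOURCE B (Python) =====
-- def wordlength(tx):
--     '''Returns the sum of letters of a string.'''
--     return sum(1 for c in tx if not c.isspace())
-- ===== Notes on version B (the rewrite author's own statement) =====
-- stated objective: simpler
-- what changed: Counts non-whitespace characters in one pass over the string instead of splitting into a word list and summing word lengths; the empty-string guard disappears.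
import Mathlib
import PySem

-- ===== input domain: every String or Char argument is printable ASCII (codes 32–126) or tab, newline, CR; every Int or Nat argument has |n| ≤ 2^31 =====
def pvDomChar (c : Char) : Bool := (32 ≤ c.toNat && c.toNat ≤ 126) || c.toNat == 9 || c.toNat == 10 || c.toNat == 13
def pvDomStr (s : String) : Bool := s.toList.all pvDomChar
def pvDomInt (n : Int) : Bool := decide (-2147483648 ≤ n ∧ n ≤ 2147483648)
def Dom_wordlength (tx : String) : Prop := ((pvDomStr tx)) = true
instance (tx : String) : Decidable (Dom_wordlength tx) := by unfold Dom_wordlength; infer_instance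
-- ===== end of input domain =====

-- B counts non-whitespace characters in one pass instead of splitting into words and summing lengths.

-- ===== PORT A =====
-- literal port: guard len(tx)<1, then split on whitespace and sum word lengths with a loop
def wordlength (tx : String) : Int :=
  if PySem.Str.len tx < 1 then 0
  else (PySem.Str.split₀ tx).foldl (fun j w => j + PySem.Str.len w) 0

-- ===== PORT B =====
-- literal port of Source B: sum(1 for c in tx if not c.isspace())
def wordlength_alt (tx : String) : Int :=
  tx.toList.foldl (fun j c => if PySem.Chars.isspace c then j else j + 1) 0

-- ===== PRECONDITION & SPEC =====
def Spec_wordlength (tx : String) (out : Int) : Prop := out = wordlength_alt tx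
instance (tx : String) (out : Int) : Decidable (Spec_wordlength tx out) := by unfold Spec_wordlength; infer_instance

-- ===== CLAIM (what is proved, stated in full; the proofs are below) =====
def Claim_equal_wordlength : Prop := ∀ (tx : String), Dom_wordlength tx → Spec_wordlength tx (wordlength tx)

-- ===== LEMMAS AND PROOFS =====

-- A's summing loop computes the sum of the lengths
theorem foldl_len_eq_sum (l : List String) (J : Int) :
    l.foldl (fun j w => j + (w.toList.length : Int)) J
      = J + ((l.map (fun w => w.toList.length)).sum : Nat) := by
  induction l generalizing J with
  | nil => simp
  | cons w t ih => simp only [List.foldl_cons, List.map_cons, List.sum_cons, ih]; push_cast; ring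

-- B's counting loop computes the number of non-whitespace characters
theorem foldl_count_eq_filter (s : List Char) (J : Int) :
    s.foldl (fun j c => if PySem.Chars.isspace c then j else j + 1) J
      = J + ((s.filter (fun c => !PySem.Chars.isspace c)).length : Nat) := by
  induction s generalizing J with
  | nil => simp
  | cons c t ih =>
    by_cases h : PySem.Chars.isspace c = true <;>
      simp [List.foldl, h, ih]; omega

-- invariant of split₀.go: total length of the output words
theorem go_sum (s cur : List Char) (acc : List (List Char)) :
    ((PySem.Chars.split₀.go s cur acc).map List.length).sum
      = ((acc.map List.length).sum + cur.length)
        + (s.filter (fun c => !PySem.Chars.isspace c)).length := by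
  induction s generalizing cur acc with
  | nil =>
    by_cases h : cur.isEmpty = true <;>
      simp_all [PySem.Chars.split₀.go, List.isEmpty_iff]
  | cons c t ih =>
    by_cases hs : PySem.Chars.isspace c = true
    · by_cases h : cur.isEmpty = true <;>
        simp_all [PySem.Chars.split₀.go, List.isEmpty_iff] <;> omega
    · simp [PySem.Chars.split₀.go, hs, ih]; omega

theorem split₀_sum (s : List Char) :
    ((PySem.Chars.split₀ s).map List.length).sum
      = (s.filter (fun c => !PySem.Chars.isspace c)).length := by
  simpa using go_sum s [] []

-- ===== VERDICT (by name: the statement is the Claim_ definition above) =====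
theorem wordlength_spec : Claim_equal_wordlength := by
  intro tx _
  unfold Spec_wordlength wordlength wordlength_alt
  rw [foldl_count_eq_filter]
  split_ifs with h
  · have : tx.toList.length = 0 := by
      have := PySem.Str.len_eq tx; omega
    simp [List.length_eq_zero_iff.mp this]
  · have hmap : (PySem.Str.split₀ tx).map (fun w => w.toList.length)
        = (PySem.Chars.split₀ tx.toList).map List.length := by
      rw [← PySem.Str.split₀_map_toList, List.map_map]; rfl
    calc (PySem.Str.split₀ tx).foldl (fun j w => j + PySem.Str.len w) 0
        = (PySem.Str.split₀ tx).foldl (fun j w => j + (w.toList.length : Int)) 0 := by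
          simp [PySem.Str.len_eq]
      _ = (((PySem.Str.split₀ tx).map (fun w => w.toList.length)).sum : Nat) := by
          simpa using foldl_len_eq_sum (PySem.Str.split₀ tx) 0
      _ = 0 + ((tx.toList.filter (fun c => !PySem.Chars.isspace c)).length : Nat) := by
          rw [hmap, split₀_sum]; simp
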